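-- pv_equiv track=rewrite | github.com/paiml/depyler | examples/hard_number_spiral.py | spiral_sum_ring
-- ===== SOURCE A (Python) =====
-- def spiral_sum_ring(grid: list[int], size: int, ring: int) -> int:
--     """Sum all elements in a given ring of the spiral grid."""
--     total: int = 0
--     col: int = ring
--     while col < size - ring:
--         idx: int = ring * size + col
--         total = total + grid[idx]
--         col = col + 1
--     row: int = ring + 1
--     while row < size - ring:
--         idx2: int = row * size + (size - ring - 1)
--         total = total + grid[idx2]
--         row = row + 1
--     col2: int = size - ring - 2
--     while col2 >= ring:
--         idx3: int = (size - ring - 1) * size + col2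
--         total = total + grid[idx3]
--         col2 = col2 - 1
--     row2: int = size - ring - 2
--     while row2 > ring:
--         idx4: int = row2 * size + ring
--         total = total + grid[idx4]
--         row2 = row2 - 1
--     return total
-- ===== SOURCE B (Python) =====
-- def spiral_sum_ring(grid: list[int], size: int, ring: int) -> int:
--     """Sum all elements in a given ring of the spiral grid.
--
--     Row-wise scan: the top and bottom rows of the ring contribute in full,
--     each middle row contributes only its left and right cells."""
--     lo = ring
--     hi = size - ring - 1
--     total = 0
--     for r in range(lo, hi + 1):
--         if r == lo or r == hi:
--             for c in range(lo, hi + 1):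
--                 total += grid[r * size + c]
--         else:
--             total += grid[r * size + lo] + grid[r * size + hi]
--     return total
-- ===== Notes on version B (the rewrite author's own statement) =====
-- stated objective: simpler
-- what changed: Replaces A's four directional perimeter walks (top row, right column, bottom row backwards, left column upwards, with asymmetric corner-avoiding bounds) by a single top-to-bottom row scan: the first and last row of the ring contribute in full, every middle row contributes its left and right cell.
import Mathlib
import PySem

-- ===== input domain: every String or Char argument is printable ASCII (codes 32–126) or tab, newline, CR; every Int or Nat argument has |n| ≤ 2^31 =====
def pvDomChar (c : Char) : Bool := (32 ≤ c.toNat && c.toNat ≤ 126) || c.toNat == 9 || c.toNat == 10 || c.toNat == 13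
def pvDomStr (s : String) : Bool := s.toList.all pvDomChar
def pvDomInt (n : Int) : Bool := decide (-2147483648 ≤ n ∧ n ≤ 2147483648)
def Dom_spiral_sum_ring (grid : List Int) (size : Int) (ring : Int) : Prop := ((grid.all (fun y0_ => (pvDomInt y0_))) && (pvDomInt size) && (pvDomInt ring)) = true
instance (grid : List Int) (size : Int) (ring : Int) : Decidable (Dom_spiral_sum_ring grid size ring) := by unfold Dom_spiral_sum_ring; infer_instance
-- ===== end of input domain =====

-- B replaces A's four directional perimeter walks by a single top-to-bottom row scan
-- (full first/last row, left+right pair per middle row); objective: simpler.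

-- ===== PORT A =====
-- grid[idx] ; under Pre_ every access is in range, so pyGet? is some and getD 0 is exact
def pvCellA (grid : List Int) (i : Int) : Int := (PySem.List.pyGet? grid i).getD 0

-- while col < size - ring: total += grid[ring*size + col]
def pvLoopTop (grid : List Int) (size ring col total : Int) : Int :=
  if _h : col < size - ring then
    pvLoopTop grid size ring (col + 1) (total + pvCellA grid (ring * size + col))
  else total
termination_by (size - ring - col).toNat
decreasing_by omega

-- while row < size - ring: total += grid[row*size + (size - ring - 1)]
def pvLoopRight (grid : List Int) (size ring row total : Int) : Int :=
  if _h : row < size - ring then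
    pvLoopRight grid size ring (row + 1) (total + pvCellA grid (row * size + (size - ring - 1)))
  else total
termination_by (size - ring - row).toNat
decreasing_by omega

-- while col2 >= ring: total += grid[(size - ring - 1)*size + col2]; col2 -= 1
def pvLoopBottom (grid : List Int) (size ring col2 total : Int) : Int :=
  if _h : ring ≤ col2 then
    pvLoopBottom grid size ring (col2 - 1) (total + pvCellA grid ((size - ring - 1) * size + col2))
  else total
termination_by (col2 + 1 - ring).toNat
decreasing_by omega

-- while row2 > ring: total += grid[row2*size + ring]; row2 -= 1
def pvLoopLeft (grid : List Int) (size ring row2 total : Int) : Int :=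
  if _h : ring < row2 then
    pvLoopLeft grid size ring (row2 - 1) (total + pvCellA grid (row2 * size + ring))
  else total
termination_by (row2 - ring).toNat
decreasing_by omega

def spiral_sum_ring (grid : List Int) (size : Int) (ring : Int) : Int :=
  let t1 := pvLoopTop grid size ring ring 0
  let t2 := pvLoopRight grid size ring (ring + 1) t1
  let t3 := pvLoopBottom grid size ring (size - ring - 2) t2
  pvLoopLeft grid size ring (size - ring - 2) t3

-- ===== PORT B =====
-- grid[...] in Source B: same indexing primitive as A's port (shared helper pvCellA)
-- one iteration of the outer row loop: full row if r is the top or bottom row, else the side pair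
def pvRowStep (grid : List Int) (size lo hi r total : Int) : Int :=
  if r = lo ∨ r = hi then
    (PySem.List.pyRange lo (hi + 1) 1).foldl (fun t c => t + pvCellA grid (r * size + c)) total
  else total + (pvCellA grid (r * size + lo) + pvCellA grid (r * size + hi))

def spiral_sum_ring_alt (grid : List Int) (size : Int) (ring : Int) : Int :=
  let lo := ring
  let hi := size - ring - 1
  (PySem.List.pyRange lo (hi + 1) 1).foldl (fun total r => pvRowStep grid size lo hi r total) 0

-- ===== PRECONDITION & SPEC =====
-- Pre_ holds exactly when Python A returns (no IndexError): either the ring is empty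
-- (2*ring >= size: no cell is touched) or the four corner flat indices of the ring are valid
-- Python indices of grid — every index the programs touch lies between two of the corners.
def Pre_spiral_sum_ring (grid : List Int) (size : Int) (ring : Int) : Prop :=
  2 * ring ≥ size ∨
    (PySem.Raise.InRange grid.length (ring * size + ring) ∧
     PySem.Raise.InRange grid.length (ring * size + (size - ring - 1)) ∧
     PySem.Raise.InRange grid.length ((size - ring - 1) * size + ring) ∧
     PySem.Raise.InRange grid.length ((size - ring - 1) * size + (size - ring - 1)))
instance (grid : List Int) (size : Int) (ring : Int) : Decidable (Pre_spiral_sum_ring grid size ring) := by unfold Pre_spiral_sum_ring; infer_instance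

def pvWitness_spiral_sum_ring : List Int × Int × Int := ([1, 2, 3, 4, 5, 6, 7, 8, 9], 3, 0)

def Spec_spiral_sum_ring (grid : List Int) (size : Int) (ring : Int) (out : Int) : Prop := out = spiral_sum_ring_alt grid size ring
instance (grid : List Int) (size : Int) (ring : Int) (out : Int) : Decidable (Spec_spiral_sum_ring grid size ring out) := by unfold Spec_spiral_sum_ring; infer_instance

-- ===== CLAIM (what is proved, stated in full; the proofs are below) =====
def Claim_equal_spiral_sum_ring : Prop := ∀ (grid : List Int) (size : Int) (ring : Int), Dom_spiral_sum_ring grid size ring → Pre_spiral_sum_ring grid size ring → Spec_spiral_sum_ring grid size ring (spiral_sum_ring grid size ring)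

-- ===== LEMMAS AND PROOFS =====

-- the value a middle/edge row contributes in B
def pvRowVal (grid : List Int) (size lo hi r : Int) : Int :=
  if r = lo ∨ r = hi then
    ((PySem.List.pyRange lo (hi + 1) 1).map (fun c => pvCellA grid (r * size + c))).sum
  else pvCellA grid (r * size + lo) + pvCellA grid (r * size + hi)

theorem pvRowStep_eq (grid : List Int) (size lo hi r total : Int) :
    pvRowStep grid size lo hi r total = total + pvRowVal grid size lo hi r := by
  unfold pvRowStep pvRowVal
  split_ifs with h
  · rw [PySem.List.foldl_add]
  · ring

theorem pvLoopTop_eq (grid : List Int) (size ring : Int) : ∀ (col total : Int),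
    pvLoopTop grid size ring col total =
      total + ((PySem.List.pyRange col (size - ring) 1).map (fun c => pvCellA grid (ring * size + c))).sum := by
  intro col total
  fun_induction pvLoopTop grid size ring col total with
  | case1 col total h ih =>
    rw [ih, PySem.List.pyRange_one_cons h]
    simp; ring
  | case2 col total h =>
    rw [PySem.List.pyRange_one_eq_nil (by omega)]
    simp

theorem pvLoopRight_eq (grid : List Int) (size ring : Int) : ∀ (row total : Int),
    pvLoopRight grid size ring row total =
      total + ((PySem.List.pyRange row (size - ring) 1).map (fun r => pvCellA grid (r * size + (size - ring - 1)))).sum := by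
  intro row total
  fun_induction pvLoopRight grid size ring row total with
  | case1 row total h ih =>
    rw [ih, PySem.List.pyRange_one_cons h]
    simp; ring
  | case2 row total h =>
    rw [PySem.List.pyRange_one_eq_nil (by omega)]
    simp

theorem pvLoopBottom_eq (grid : List Int) (size ring : Int) : ∀ (col2 total : Int),
    pvLoopBottom grid size ring col2 total =
      total + ((PySem.List.pyRange ring (col2 + 1) 1).map (fun c => pvCellA grid ((size - ring - 1) * size + c))).sum := by
  intro col2 total
  fun_induction pvLoopBottom grid size ring col2 total with
  | case1 col2 total h ih =>
    rw [ih, show col2 - 1 + 1 = col2 by ring, PySem.List.pyRange_one_succ_right h]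
    simp; ring
  | case2 col2 total h =>
    rw [PySem.List.pyRange_one_eq_nil (by omega)]
    simp

theorem pvLoopLeft_eq (grid : List Int) (size ring : Int) : ∀ (row2 total : Int),
    pvLoopLeft grid size ring row2 total =
      total + ((PySem.List.pyRange (ring + 1) (row2 + 1) 1).map (fun r => pvCellA grid (r * size + ring))).sum := by
  intro row2 total
  fun_induction pvLoopLeft grid size ring row2 total with
  | case1 row2 total h ih =>
    rw [ih, show row2 - 1 + 1 = row2 by ring, PySem.List.pyRange_one_succ_right (by omega)]
    simp; ring
  | case2 row2 total h =>
    rw [PySem.List.pyRange_one_eq_nil (by omega)]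
    simp

theorem spiral_sum_ring_alt_eq_sum (grid : List Int) (size ring : Int) :
    spiral_sum_ring_alt grid size ring =
      ((PySem.List.pyRange ring (size - ring) 1).map
        (fun r => pvRowVal grid size ring (size - ring - 1) r)).sum := by
  unfold spiral_sum_ring_alt
  simp only [pvRowStep_eq]
  rw [PySem.List.foldl_add]
  norm_num

-- the two programs visit the same multiset of cells: regroup A's four walks row by row
theorem pv_main (grid : List Int) (size ring : Int) :
    spiral_sum_ring grid size ring = spiral_sum_ring_alt grid size ring := by
  rw [show spiral_sum_ring grid size ring =
        pvLoopLeft grid size ring (size - ring - 2)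
          (pvLoopBottom grid size ring (size - ring - 2)
            (pvLoopRight grid size ring (ring + 1)
              (pvLoopTop grid size ring ring 0))) from rfl]
  rw [pvLoopTop_eq, pvLoopRight_eq, pvLoopBottom_eq, pvLoopLeft_eq,
      spiral_sum_ring_alt_eq_sum]
  set lo := ring with hlo
  rcases lt_trichotomy (size - ring) (lo + 1) with hcase | hcase | hcase
  · -- empty ring: every range is empty
    rw [PySem.List.pyRange_one_eq_nil (a := lo) (by omega),
        PySem.List.pyRange_one_eq_nil (a := lo + 1) (by omega),
        PySem.List.pyRange_one_eq_nil (a := lo) (b := size - lo - 2 + 1) (by omega),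
        PySem.List.pyRange_one_eq_nil (a := lo + 1) (b := size - lo - 2 + 1) (by omega)]
    simp
  · -- single-cell ring: size - ring = ring + 1
    rw [hcase]
    rw [show lo + 1 - 1 = lo by ring, show lo + 1 - 2 + 1 = lo by ring]
    rw [PySem.List.pyRange_one_eq_nil (a := lo) (b := lo) (by omega),
        PySem.List.pyRange_one_eq_nil (a := lo + 1) (b := lo) (by omega)]
    have h1 : PySem.List.pyRange lo (lo + 1) 1 = [lo] := PySem.List.pyRange_one_singleton lo
    rw [h1]
    simp [pvRowVal, h1]
  · -- proper ring: lo + 1 < size - ring, set hi := size - ring - 1, lo < hi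
    set hi := size - ring - 1 with hhi
    have hlohi : lo < hi := by omega
    rw [show size - lo - 2 + 1 = hi by omega, show size - lo = hi + 1 by omega]
    -- split A's ranges at the corners, and B's row range into top / middle / bottom
    rw [PySem.List.pyRange_one_succ_right (a := lo + 1) (b := hi) (by omega),      -- right col
        PySem.List.pyRange_one_cons (a := lo) (b := hi + 1) (by omega),            -- B rows: peel lo
        PySem.List.pyRange_one_succ_right (a := lo + 1) (b := hi) (by omega)]      -- B rows: peel hi
    simp only [List.map_append, List.sum_append, List.map_cons, List.sum_cons,
               List.map_nil, List.sum_nil]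
    -- rows strictly between lo and hi contribute the side pair
    have hmid :
        ((PySem.List.pyRange (lo + 1) hi 1).map (fun r => pvRowVal grid size lo hi r)).sum =
          ((PySem.List.pyRange (lo + 1) hi 1).map
            (fun r => pvCellA grid (r * size + lo) + pvCellA grid (r * size + hi))).sum := by
      congr 1
      apply List.map_congr_left
      intro r hr
      rw [PySem.List.mem_pyRange_one] at hr
      unfold pvRowVal
      rw [if_neg (by omega)]
    rw [hmid, PySem.List.sum_map_add_int]
    -- the full top and bottom rows of B
    unfold pvRowVal
    rw [if_pos (Or.inl rfl), if_pos (Or.inr rfl)]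
    -- split B's bottom row at its last column (the corner A's right walk took)
    rw [PySem.List.pyRange_one_succ_right (a := lo) (b := hi) (by omega),
        PySem.List.pyRange_one_cons (a := lo) (b := hi) (by omega)]
    simp only [List.map_append, List.sum_append, List.map_cons, List.map_nil,
               List.sum_cons, List.sum_nil]
    ring

-- ===== VERDICT (by name: the statement is the Claim_ definition above) =====
theorem spiral_sum_ring_spec : Claim_equal_spiral_sum_ring := by
  intro grid size ring _ _
  unfold Spec_spiral_sum_ring
  exact pv_main grid size ring
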